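-- pv_equiv track=rewrite | github.com/mitesh1691/Who_ate_my_code | src/Round_2_Solutions.py | difference_between_sums
-- ===== SOURCE A (Python) =====
-- def difference_between_sums(nums):
--     if nums is None or len(nums) < 2:
--         raise ValueError("Array should contain at least two elements.")
--
--     sum_even = 0
--     sum_odd = 0
--
--     for i in range(len(nums)):
--         if i % 2 == 0:
--             sum_even += nums[i]
--         else:
--             sum_odd += nums[i]
--
--     return abs(sum_even - sum_odd)
-- ===== SOURCE B (Python) =====
-- def difference_between_sums(nums):
--     if nums is None or len(nums) < 2:
--         raise ValueError("Array should contain at least two elements.")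
--
--     sum_odd = 0
--     it = iter(nums)
--     for _ in it:               # consumes an even-indexed element
--         sum_odd += next(it, 0)  # consumes the following odd-indexed one
--     return abs(sum(nums) - 2 * sum_odd)
-- ===== Notes on version B (the rewrite author's own statement) =====
-- stated objective: alternative
-- what changed: Instead of two parity-branched index-driven accumulators, B keeps a single accumulator of the odd-indexed elements consumed pairwise from an iterator and returns abs(sum(nums) - 2*sum_odd), using the identity even-sum - odd-sum = total - 2*odd-sum.
import Mathlib
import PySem

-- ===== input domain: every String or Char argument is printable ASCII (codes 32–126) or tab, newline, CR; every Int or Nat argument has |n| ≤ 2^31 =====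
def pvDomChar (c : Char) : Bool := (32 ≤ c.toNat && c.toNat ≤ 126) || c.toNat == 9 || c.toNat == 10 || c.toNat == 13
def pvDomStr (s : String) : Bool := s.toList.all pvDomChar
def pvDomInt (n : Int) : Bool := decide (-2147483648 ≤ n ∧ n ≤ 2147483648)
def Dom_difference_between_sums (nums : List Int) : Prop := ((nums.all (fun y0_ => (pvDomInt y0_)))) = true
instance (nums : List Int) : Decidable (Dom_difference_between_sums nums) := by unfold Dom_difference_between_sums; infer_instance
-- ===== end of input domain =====

-- B replaces A's two parity-branched index-driven accumulators with a single
-- odd-indexed-sum accumulator consumed pairwise, returning |sum(nums) - 2*sum_odd|.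


-- ===== PORT A =====
def difference_between_sums (nums : List Int) : Int :=
  if PySem.List.len nums < 2 then 0  -- Python raises ValueError here; excluded by Pre_
  else
    let p := (PySem.List.pyRange 0 (PySem.List.len nums) 1).foldl
      (fun (p : Int × Int) i =>
        if PySem.Int.mod i 2 = 0 then (p.1 + PySem.List.pyGetD nums i 0, p.2)
        else (p.1, p.2 + PySem.List.pyGetD nums i 0)) (0, 0)
    |p.1 - p.2|

-- ===== PORT B =====
-- B's loop: each iteration consumes one even-indexed element (ignored) and,
-- via next(it, 0), the following odd-indexed element (added; default 0 at the end).
def pvOddLoop : List Int → Int → Int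
  | [], acc => acc
  | [_], acc => acc + 0
  | _ :: y :: rest, acc => pvOddLoop rest (acc + y)

def difference_between_sums_alt (nums : List Int) : Int :=
  if PySem.List.len nums < 2 then 0  -- Python raises ValueError here; excluded by Pre_
  else
    let sum_odd := pvOddLoop nums 0
    |nums.sum - 2 * sum_odd|

-- ===== PRECONDITION & SPEC =====
-- Pre_ excludes exactly the inputs on which Python A raises ValueError (fewer than two elements).
def Pre_difference_between_sums (nums : List Int) : Prop := 2 ≤ nums.length
instance (nums : List Int) : Decidable (Pre_difference_between_sums nums) := by unfold Pre_difference_between_sums; infer_instance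
def pvWitness_difference_between_sums : List Int := [1, 2]

def Spec_difference_between_sums (nums : List Int) (out : Int) : Prop := out = difference_between_sums_alt nums
instance (nums : List Int) (out : Int) : Decidable (Spec_difference_between_sums nums out) := by unfold Spec_difference_between_sums; infer_instance

-- ===== CLAIM (what is proved, stated in full; the proofs are below) =====
def Claim_equal_difference_between_sums : Prop := ∀ (nums : List Int), Dom_difference_between_sums nums → Pre_difference_between_sums nums → Spec_difference_between_sums nums (difference_between_sums nums)

-- ===== LEMMAS AND PROOFS =====

-- A's loop, folded over enumerate: abbreviation for readability of the lemmas.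
def pvFoldA (l : List (Int × Int)) (p : Int × Int) : Int × Int :=
  l.foldl (fun (p : Int × Int) q =>
    if PySem.Int.mod q.1 2 = 0 then (p.1 + q.2, p.2) else (p.1, p.2 + q.2)) p

-- The two accumulators of A's loop together sum all elements (any start index).
theorem pvFoldA_sum (xs : List Int) : ∀ (s : Int) (p : Int × Int),
    (pvFoldA (PySem.List.enumerate xs s) p).1 + (pvFoldA (PySem.List.enumerate xs s) p).2
      = p.1 + p.2 + xs.sum := by
  induction xs with
  | nil => intro s p; simp [PySem.List.enumerate_nil, pvFoldA]
  | cons x xs ih =>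
    intro s p
    rw [PySem.List.enumerate_cons]
    simp only [pvFoldA, List.foldl_cons]
    by_cases h : PySem.Int.mod s 2 = 0
    · rw [if_pos h,
        show ∀ q, List.foldl _ q _ = pvFoldA (PySem.List.enumerate xs (s+1)) q from fun _ => rfl,
        ih (s+1)]
      simp [List.sum_cons]; ring
    · rw [if_neg h,
        show ∀ q, List.foldl _ q _ = pvFoldA (PySem.List.enumerate xs (s+1)) q from fun _ => rfl,
        ih (s+1)]
      simp [List.sum_cons]; ring

-- B's accumulator shift law.
theorem pvOddLoop_shift : ∀ (xs : List Int) (a : Int), pvOddLoop xs a = a + pvOddLoop xs 0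
  | [], a => by simp [pvOddLoop]
  | [_], a => by simp [pvOddLoop]
  | x :: y :: rest, a => by
    simp only [pvOddLoop]
    rw [pvOddLoop_shift rest (a + y), pvOddLoop_shift rest (0 + y)]; ring

-- The odd accumulator of A's loop equals B's pairwise odd-sum, for an even start index.
theorem pvFoldA_odd : ∀ (xs : List Int) (s : Int) (p : Int × Int), (2 : Int) ∣ s →
    (pvFoldA (PySem.List.enumerate xs s) p).2 = p.2 + pvOddLoop xs 0
  | [], s, p, _ => by simp [PySem.List.enumerate_nil, pvFoldA, pvOddLoop]
  | [x], s, p, hs => by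
    rw [PySem.List.enumerate_cons, PySem.List.enumerate_nil]
    simp [pvFoldA, pvOddLoop, hs]
  | x :: y :: rest, s, p, hs => by
    rw [PySem.List.enumerate_cons, PySem.List.enumerate_cons]
    have h0 : PySem.Int.mod s 2 = 0 := (PySem.Int.mod_eq_zero_iff_dvd s 2).mpr hs
    have h1 : ¬ PySem.Int.mod (s + 1) 2 = 0 := by
      rw [PySem.Int.mod_eq_zero_iff_dvd]; omega
    simp only [pvFoldA, List.foldl_cons, if_pos h0, if_neg h1]
    rw [show ∀ q, List.foldl _ q _ = pvFoldA (PySem.List.enumerate rest (s+1+1)) q from fun _ => rfl,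
      pvFoldA_odd rest (s+1+1) _ (by omega), pvOddLoop, pvOddLoop_shift rest (0 + y)]
    ring

-- ===== VERDICT (by name: the statement is the Claim_ definition above) =====
theorem difference_between_sums_spec : Claim_equal_difference_between_sums := by
  intro nums _ hpre
  unfold Spec_difference_between_sums difference_between_sums difference_between_sums_alt
  have hlen : ¬ PySem.List.len nums < 2 := by
    simp only [PySem.List.len_eq, not_lt]
    exact_mod_cast hpre
  rw [if_neg hlen, if_neg hlen]
  have henum := PySem.List.enumerate_eq_map_pyRange (xs := nums) (d := (0 : Int))
  have hsum := pvFoldA_sum nums 0 (0, 0)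
  have hodd := pvFoldA_odd nums 0 (0, 0) ⟨0, by ring⟩
  rw [henum] at hsum hodd
  simp only [pvFoldA, List.foldl_map, PySem.List.len_eq] at hsum hodd ⊢
  congr 1
  omega
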